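-- pv_equiv track=rewrite | github.com/jjimenez02/early-stop-p300 | utils/report_utils.py | get_acronym
-- ===== SOURCE A (Python) =====
-- def get_acronym(input_string: str):
--     '''
--     This method will build an acronym
--     from the given string. Specifically
--     it will upper case the whole string
--     and get the first letter of every word.
--
--     Example:
--     ```
--     get_acronym("hello - world 2024asd dsa")
--     ----- Output -----
--     'H-W2D'
--     ```
--
--     :param input_string: String to
--     transform into an acronym.
--     '''
--     # Split the string into words
--     words = list()
--     bow = list()
--     bow_tmp = list()
--     for word in input_string.split():
--         bow.append(word)
--
--         # We consider dyphens
--         for subword in bow: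
--             if '-' in subword:
--                 dyphen_subwords = subword.split('-')
--                 if not dyphen_subwords == ['', '']:
--                     bow_tmp += dyphen_subwords
--                 else:
--                     bow_tmp += ['-']
--             else:
--                 bow_tmp.append(subword)
--         bow.clear()
--
--         bow += bow_tmp
--         bow_tmp.clear()
--
--         for subword in bow:
--             if '_' in subword:
--                 unders_words = subword.split('_')
--                 bow_tmp += unders_words
--             else:
--                 bow_tmp.append(subword)
--         bow.clear()
--
--         bow += bow_tmp
--         bow_tmp.clear()
--
--         words += bow
--         bow.clear()
--
--     # Take the first letter of each word and make them uppercase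
--     first_letters = [word[0].upper() for word in words if word]
--     # Join the first letters to form the acronym
--     acronym = ''.join(first_letters)
--     return acronym
-- ===== SOURCE B (Python) =====
-- def get_acronym(input_string: str):
--     '''Single scan per token with a new-fragment flag instead of
--     two buffered split passes.'''
--     out = []
--     for tok in input_string.split():
--         if tok == '-':
--             out.append('-')
--             continue
--         new_frag = True
--         for ch in tok:
--             if ch in '-_':
--                 new_frag = True
--             elif new_frag:
--                 out.append(ch.upper())
--                 new_frag = False
--     return ''.join(out)
-- ===== Notes on version B (the rewrite author's own statement) =====
-- stated objective: simpler
-- what changed: Replaces A's two sequential buffered split-and-rebuild passes over intermediate word lists (bow/bow_tmp) with a single character scan per whitespace token that tracks a new-fragment flag and emits each fragment's first letter directly; the special case for a token consisting of a single hyphen is kept as in A.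
import Mathlib
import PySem

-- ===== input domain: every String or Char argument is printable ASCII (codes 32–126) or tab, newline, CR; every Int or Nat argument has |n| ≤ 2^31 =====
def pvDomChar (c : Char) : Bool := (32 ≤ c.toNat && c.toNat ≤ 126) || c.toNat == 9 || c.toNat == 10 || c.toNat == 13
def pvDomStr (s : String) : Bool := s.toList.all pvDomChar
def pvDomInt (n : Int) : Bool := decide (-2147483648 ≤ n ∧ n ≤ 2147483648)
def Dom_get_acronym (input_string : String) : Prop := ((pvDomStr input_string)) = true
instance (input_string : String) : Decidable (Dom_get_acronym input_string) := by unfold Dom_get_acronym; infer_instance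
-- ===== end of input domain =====

-- B replaces A's two buffered split-and-rebuild passes with one character scan per token; objective: simpler.

-- ===== PORT A =====
def get_acronym (input_string : String) : String :=
  -- words accumulated over split(); per token: bow := [word], hyphen pass into bow_tmp, underscore pass, then words += result
  let words := (PySem.Chars.split₀ input_string.toList).foldl (fun words word =>
    let bow : List (List Char) := [word]
    let bow_tmp := bow.foldl (fun bt subword =>
      if PySem.Chars.isIn ['-'] subword then
        let dyphen_subwords := PySem.Chars.splitOn subword ['-']
        if dyphen_subwords ≠ [[], []] then bt ++ dyphen_subwords else bt ++ [['-']]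
      else bt ++ [subword]) ([] : List (List Char))
    let bow2 := bow_tmp
    let bow_tmp2 := bow2.foldl (fun bt subword =>
      if PySem.Chars.isIn ['_'] subword then bt ++ PySem.Chars.splitOn subword ['_']
      else bt ++ [subword]) ([] : List (List Char))
    words ++ bow_tmp2) []
  -- [word[0].upper() for word in words if word], then ''.join
  let first_letters := words.filterMap (fun w => match w with
    | [] => none
    | c :: _ => some (PySem.Chars.upperChar c))
  String.mk first_letters

-- ===== PORT B =====
def get_acronym_alt (input_string : String) : String :=
  let out := (PySem.Chars.split₀ input_string.toList).foldl (fun out tok =>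
    if tok = ['-'] then out ++ ['-']
    else (tok.foldl (fun (p : List Char × Bool) ch =>
        if ch = '-' ∨ ch = '_' then (p.1, true)
        else if p.2 then (p.1 ++ [PySem.Chars.upperChar ch], false)
        else (p.1, false)) (out, true)).1) []
  String.mk out

-- ===== PRECONDITION & SPEC =====
def Spec_get_acronym (input_string : String) (out : String) : Prop := out = get_acronym_alt input_string
instance (input_string : String) (out : String) : Decidable (Spec_get_acronym input_string out) := by unfold Spec_get_acronym; infer_instance

-- ===== CLAIM (what is proved, stated in full; the proofs are below) =====
def Claim_equal_get_acronym : Prop := ∀ (input_string : String), Dom_get_acronym input_string → Spec_get_acronym input_string (get_acronym input_string)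

-- ===== LEMMAS AND PROOFS =====

-- prepend a char to the first piece (the first piece always exists for pvSplit1)
def pvConsHead (a : Char) : List (List Char) → List (List Char)
  | [] => [[a]]
  | h :: t => (a :: h) :: t

-- structural form of splitOn with a single-char separator
def pvSplit1 (c : Char) : List Char → List (List Char)
  | [] => [[]]
  | a :: t => if a = c then [] :: pvSplit1 c t else pvConsHead a (pvSplit1 c t)

-- fragments between '-'/'_' separators
def pvFrags : List Char → List (List Char)
  | [] => [[]]
  | a :: t => if a = '-' ∨ a = '_' then [] :: pvFrags t else pvConsHead a (pvFrags t)

-- B's inner scan, state = new-fragment flag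
def pvScan : List Char → Bool → List Char
  | [], _ => []
  | a :: t, flag =>
      if a = '-' ∨ a = '_' then pvScan t true
      else if flag then PySem.Chars.upperChar a :: pvScan t false
      else pvScan t false

def pvHeadUpper (w : List Char) : Option Char :=
  match w with
  | [] => none
  | c :: _ => some (PySem.Chars.upperChar c)

theorem pvSplit1_ne_nil (c : Char) (l : List Char) : pvSplit1 c l ≠ [] := by
  cases l with
  | nil => simp [pvSplit1]
  | cons a t =>
    simp only [pvSplit1]
    split
    · simp
    · cases h : pvSplit1 c t <;> simp [pvConsHead]

theorem pvFrags_ne_nil (l : List Char) : pvFrags l ≠ [] := by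
  cases l with
  | nil => simp [pvFrags]
  | cons a t =>
    simp only [pvFrags]
    split
    · simp
    · cases h : pvFrags t <;> simp [pvConsHead]

theorem pvSplitOn_go_spec (c : Char) (fuel : Nat) (l cur : List Char) (acc : List (List Char))
    (h : l.length < fuel) :
    PySem.Chars.splitOn.go [c] fuel l cur acc =
      acc.reverse ++ (match pvSplit1 c l with
        | [] => []
        | h :: t => (cur.reverse ++ h) :: t) := by
  induction fuel generalizing l cur acc with
  | zero => omega
  | succ fuel ih =>
    cases l with
    | nil => rw [PySem.Chars.splitOn.go]; simp [pvSplit1]; omega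
    | cons a rest =>
      rw [PySem.Chars.splitOn.go]
      by_cases hac : a = c
      · subst hac
        simp only [List.isPrefixOf, BEq.rfl, Bool.true_and, if_true,
          List.length_cons, List.drop_succ_cons,
          List.length_nil, List.drop]
        rw [ih rest [] (cur.reverse :: acc) (by simp at h; omega)]
        cases hs : pvSplit1 a rest with
        | nil => exact absurd hs (pvSplit1_ne_nil a rest)
        | cons p q => simp [pvSplit1, hs]
      · have : ([c].isPrefixOf (a :: rest)) = false := by
          simp [List.isPrefixOf]
          exact fun hh => absurd hh.symm hac
        rw [this]
        simp only [Bool.false_eq_true, if_false]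
        rw [ih rest (a :: cur) acc (by simp at h; omega)]
        simp only [pvSplit1, hac, if_false]
        cases hs : pvSplit1 c rest with
        | nil => exact absurd hs (pvSplit1_ne_nil c rest)
        | cons p q => simp [pvConsHead]

theorem pvSplitOn_eq (c : Char) (l : List Char) :
    PySem.Chars.splitOn l [c] = pvSplit1 c l := by
  rw [PySem.Chars.splitOn, pvSplitOn_go_spec c (l.length + 1) l [] [] (by omega)]
  cases hs : pvSplit1 c l with
  | nil => exact absurd hs (pvSplit1_ne_nil c l)
  | cons p q => simp

-- c ∉ l → splitting does nothing
theorem pvSplit1_of_not_mem (c : Char) (l : List Char) (h : c ∉ l) : pvSplit1 c l = [l] := by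
  induction l with
  | nil => rfl
  | cons a t ih =>
    simp only [List.mem_cons, not_or] at h
    simp [pvSplit1, Ne.symm h.1, ih h.2, pvConsHead]

theorem pvIsIn_singleton (c : Char) (l : List Char) :
    PySem.Chars.isIn [c] l = true ↔ c ∈ l := by
  rw [PySem.Chars.isIn_iff_infix]
  constructor
  · rintro ⟨p, q, rfl⟩; simp
  · intro h
    obtain ⟨p, q, rfl⟩ := List.append_of_mem h
    exact ⟨p, q, by simp⟩

theorem pvSplit1_eq_pair_iff (c : Char) (l : List Char) :
    pvSplit1 c l = [[], []] ↔ l = [c] := by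
  constructor
  · intro h
    cases l with
    | nil => simp [pvSplit1] at h
    | cons a t =>
      simp only [pvSplit1] at h
      by_cases hac : a = c
      · subst hac
        rw [if_pos rfl] at h
        have ht : pvSplit1 a t = [[]] := by
          have := congrArg List.tail h
          simpa using this
        cases t with
        | nil => rfl
        | cons b u =>
          exfalso
          simp only [pvSplit1] at ht
          by_cases hbc : b = a
          · rw [if_pos hbc] at ht
            injection ht with h1 h2
            exact pvSplit1_ne_nil a u h2
          · rw [if_neg hbc] at ht
            cases hs : pvSplit1 a u with
            | nil => exact pvSplit1_ne_nil a u hs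
            | cons p q => rw [hs] at ht; simp [pvConsHead] at ht
      · exfalso
        rw [if_neg hac] at h
        cases hs : pvSplit1 c t with
        | nil => exact pvSplit1_ne_nil c t hs
        | cons p q => rw [hs] at h; simp [pvConsHead] at h
  · rintro rfl
    simp [pvSplit1]

-- combined fragments = split on '-' then split each piece on '_'
theorem pvFrags_eq (l : List Char) :
    pvFrags l = (pvSplit1 '-' l).flatMap (pvSplit1 '_') := by
  induction l with
  | nil => simp [pvFrags, pvSplit1]
  | cons a t ih =>
    by_cases h1 : a = '-'
    · simp [pvFrags, pvSplit1, h1, ih]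
    · by_cases h2 : a = '_'
      · subst h2
        simp only [pvFrags, pvSplit1, if_neg h1]
        cases hs : pvSplit1 '-' t with
        | nil => exact absurd hs (pvSplit1_ne_nil _ t)
        | cons p q =>
          rw [hs] at ih
          simp [pvConsHead, pvSplit1, ih]
      · simp only [pvFrags, pvSplit1, if_neg h1,
          if_neg (by tauto : ¬(a = '-' ∨ a = '_'))]
        cases hs : pvSplit1 '-' t with
        | nil => exact absurd hs (pvSplit1_ne_nil _ t)
        | cons p q =>
          rw [hs] at ih
          cases hp : pvSplit1 '_' p with
          | nil => exact absurd hp (pvSplit1_ne_nil _ p)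
          | cons p2 q2 => simp [pvConsHead, pvSplit1, hp, ih, h2]

-- the scan emits the first letters of the fragments
theorem pvScan_eq (l : List Char) :
    (pvScan l true = (pvFrags l).filterMap pvHeadUpper) ∧
    (pvScan l false = ((pvFrags l).tail).filterMap pvHeadUpper) := by
  induction l with
  | nil => simp [pvScan, pvFrags, pvHeadUpper]
  | cons a t ih =>
    by_cases h : a = '-' ∨ a = '_'
    · simp [pvScan, pvFrags, h, pvHeadUpper, ih.1]
    · cases hs : pvFrags t with
      | nil => exact absurd hs (pvFrags_ne_nil t)
      | cons p q =>
        constructor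
        · simp [pvScan, pvFrags, h, pvConsHead, hs, pvHeadUpper, ih.2]
        · simp [pvScan, pvFrags, h, pvConsHead, hs, pvHeadUpper]
          have := ih.2
          rw [hs] at this
          simpa using this

-- B's inner foldl threads (out, flag) and appends pvScan's output
theorem pvFoldl_scan (tok : List Char) (out : List Char) (flag : Bool) :
    (tok.foldl (fun (p : List Char × Bool) ch =>
        if ch = '-' ∨ ch = '_' then (p.1, true)
        else if p.2 then (p.1 ++ [PySem.Chars.upperChar ch], false)
        else (p.1, false)) (out, flag)).1 = out ++ pvScan tok flag := by
  induction tok generalizing out flag with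
  | nil => simp [pvScan]
  | cons a t ih =>
    by_cases h : a = '-' ∨ a = '_'
    · simp [pvScan, h, ih]
    · cases flag <;> simp [pvScan, h, ih]

-- per-token output of A
def pvTokA (w : List Char) : List (List Char) :=
  (if PySem.Chars.isIn ['-'] w then
      (if PySem.Chars.splitOn w ['-'] ≠ [[], []] then PySem.Chars.splitOn w ['-'] else [['-']])
    else [w]).flatMap (fun sub =>
      if PySem.Chars.isIn ['_'] sub then PySem.Chars.splitOn sub ['_'] else [sub])

theorem pvTokA_spec (w : List Char) :
    (pvTokA w).filterMap pvHeadUpper =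
      if w = ['-'] then ['-'] else pvScan w true := by
  by_cases hw : w = ['-']
  · subst hw
    simp [pvTokA, pvIsIn_singleton, pvSplitOn_eq, pvSplit1,
      pvHeadUpper, PySem.Chars.upperChar, PySem.Chars.islower]
  · rw [if_neg hw]
    have split_underscore : ∀ sub : List Char,
        (if PySem.Chars.isIn ['_'] sub then PySem.Chars.splitOn sub ['_'] else [sub]) =
          pvSplit1 '_' sub := by
      intro sub
      by_cases h : PySem.Chars.isIn ['_'] sub
      · simp [h, pvSplitOn_eq]
      · rw [if_neg h, pvSplit1_of_not_mem]
        intro hm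
        exact h ((pvIsIn_singleton '_' sub).mpr hm)
    have pass1 : (if PySem.Chars.isIn ['-'] w then
        (if PySem.Chars.splitOn w ['-'] ≠ [[], []] then PySem.Chars.splitOn w ['-'] else [['-']])
       else [w]) = pvSplit1 '-' w := by
      by_cases h : PySem.Chars.isIn ['-'] w
      · rw [if_pos h, pvSplitOn_eq]
        rw [if_pos]
        intro hp
        exact hw ((pvSplit1_eq_pair_iff '-' w).mp hp)
      · rw [if_neg h, pvSplit1_of_not_mem]
        intro hm
        exact h ((pvIsIn_singleton '-' w).mpr hm)
    rw [pvTokA, pass1]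
    simp only [split_underscore]
    rw [(pvScan_eq w).1, pvFrags_eq]

-- A's per-token nested folds compute pvTokA
theorem pvTokA_fold (w : List Char) :
    (([w].foldl (fun bt subword =>
        if PySem.Chars.isIn ['-'] subword then
          if PySem.Chars.splitOn subword ['-'] ≠ [[], []] then bt ++ PySem.Chars.splitOn subword ['-']
          else bt ++ [['-']]
        else bt ++ [subword]) ([] : List (List Char))).foldl (fun bt subword =>
        if PySem.Chars.isIn ['_'] subword then bt ++ PySem.Chars.splitOn subword ['_']
        else bt ++ [subword]) ([] : List (List Char))) = pvTokA w := by
  simp only [List.foldl_cons, List.foldl_nil, List.nil_append]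
  rw [PySem.List.foldl_congr_mem _ _
        (fun bt subword => bt ++ (if PySem.Chars.isIn ['_'] subword
          then PySem.Chars.splitOn subword ['_'] else [subword])) _
        (by intro bt x _; by_cases h : PySem.Chars.isIn ['_'] x <;> simp [h])]
  rw [PySem.List.foldl_append_eq_flatMap]
  rw [pvTokA]
  rfl

-- the combined per-token correspondence, folded over the token list
theorem pvMainFold (toks : List (List Char)) : ∀ (ws : List (List Char)) (out : List Char),
    ws.filterMap pvHeadUpper = out →
    (toks.foldl (fun words word =>
        let bow : List (List Char) := [word]
        let bow_tmp := bow.foldl (fun bt subword =>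
          if PySem.Chars.isIn ['-'] subword then
            let dyphen_subwords := PySem.Chars.splitOn subword ['-']
            if dyphen_subwords ≠ [[], []] then bt ++ dyphen_subwords else bt ++ [['-']]
          else bt ++ [subword]) ([] : List (List Char))
        let bow2 := bow_tmp
        let bow_tmp2 := bow2.foldl (fun bt subword =>
          if PySem.Chars.isIn ['_'] subword then bt ++ PySem.Chars.splitOn subword ['_']
          else bt ++ [subword]) ([] : List (List Char))
        words ++ bow_tmp2) ws).filterMap pvHeadUpper
      = toks.foldl (fun out tok =>
          if tok = ['-'] then out ++ ['-']
          else (tok.foldl (fun (p : List Char × Bool) ch =>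
            if ch = '-' ∨ ch = '_' then (p.1, true)
            else if p.2 then (p.1 ++ [PySem.Chars.upperChar ch], false)
            else (p.1, false)) (out, true)).1) out := by
  induction toks with
  | nil => intro ws out h; simpa using h
  | cons w t ih =>
    intro ws out h
    rw [List.foldl_cons, List.foldl_cons]
    apply ih
    show (ws ++ (([w].foldl (fun bt subword =>
        if PySem.Chars.isIn ['-'] subword then
          if PySem.Chars.splitOn subword ['-'] ≠ [[], []] then bt ++ PySem.Chars.splitOn subword ['-']
          else bt ++ [['-']]
        else bt ++ [subword]) ([] : List (List Char))).foldl (fun bt subword =>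
        if PySem.Chars.isIn ['_'] subword then bt ++ PySem.Chars.splitOn subword ['_']
        else bt ++ [subword]) ([] : List (List Char)))).filterMap pvHeadUpper
      = (if w = ['-'] then out ++ ['-']
          else (w.foldl (fun (p : List Char × Bool) ch =>
            if ch = '-' ∨ ch = '_' then (p.1, true)
            else if p.2 then (p.1 ++ [PySem.Chars.upperChar ch], false)
            else (p.1, false)) (out, true)).1)
    rw [pvTokA_fold w, List.filterMap_append, h, pvTokA_spec w]
    by_cases hw : w = ['-']
    · rw [if_pos hw, if_pos hw]
    · rw [if_neg hw, if_neg hw, pvFoldl_scan]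

-- ===== VERDICT (by name: the statement is the Claim_ definition above) =====
theorem get_acronym_spec : Claim_equal_get_acronym := by
  intro s _
  show get_acronym s = get_acronym_alt s
  exact congrArg String.mk (pvMainFold (PySem.Chars.split₀ s.toList) [] [] rfl)
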